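-- pv_equiv track=rewrite | github.com/nastushan/open-cravat-modules-karchinlab | annotators/linsight/linsight.py | bins_for_range
-- ===== SOURCE A (Python) =====
-- def bins_for_range (start, end):
--     start_bin = start
--     end_bin = end - 1
--     start_bin = start_bin >> 17
--     end_bin = end_bin >> 17
--     bin_offsets = [512 + 64 + 8 + 1, 64 + 8 + 1, 8 + 1, 1, 0]
--     for bin_offset in bin_offsets:
--         yield bin_offset + start_bin, bin_offset + end_bin
--         start_bin = start_bin >> 3
--         end_bin = end_bin >> 3
--     return None
-- ===== SOURCE B (Python) =====
-- def bins_for_range(start, end):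
--     # Recursive generator: no offset table; each level's offset is derived
--     # from the previous one by offset >> 3 (585 -> 73 -> 9 -> 1 -> 0),
--     # and each level's bins come directly from start/end with one shift.
--     def go(shift, offset):
--         if shift <= 29:
--             yield offset + (start >> shift), offset + ((end - 1) >> shift)
--             yield from go(shift + 3, offset >> 3)
--     yield from go(17, 585)
-- ===== Notes on version B (the rewrite author's own statement) =====
-- stated objective: alternative
-- what changed: Replaces the loop over a constant offset table with running accumulators by a recursive generator that carries no table: it recurses over the shift amount 17..29 and derives each level's offset from the previous one via offset >> 3 (585 -> 73 -> 9 -> 1 -> 0), computing each bin pair directly from the original start/end.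
import Mathlib
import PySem

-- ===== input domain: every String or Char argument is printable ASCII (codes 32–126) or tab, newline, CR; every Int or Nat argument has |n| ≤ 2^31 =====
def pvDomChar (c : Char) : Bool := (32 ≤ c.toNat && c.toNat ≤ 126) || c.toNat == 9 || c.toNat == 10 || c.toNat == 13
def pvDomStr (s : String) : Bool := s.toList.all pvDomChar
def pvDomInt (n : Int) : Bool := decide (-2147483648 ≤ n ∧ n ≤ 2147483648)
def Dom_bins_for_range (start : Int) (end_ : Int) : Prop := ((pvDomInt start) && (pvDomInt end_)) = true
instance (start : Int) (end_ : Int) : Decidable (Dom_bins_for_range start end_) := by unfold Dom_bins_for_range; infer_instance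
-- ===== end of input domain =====

-- B replaces the offset-table loop with running accumulators by a recursive generator over the shift amount, deriving each offset from the previous by >> 3; objective: alternative (same cost).

-- ===== PORT A =====
def bins_for_range (start : Int) (end_ : Int) : List (Int × Int) :=
  -- state: (start_bin, end_bin, yielded pairs), folded over bin_offsets as in A's loop
  let start_bin := start >>> (17 : Nat)
  let end_bin := (end_ - 1) >>> (17 : Nat)
  let bin_offsets : List Int := [512 + 64 + 8 + 1, 64 + 8 + 1, 8 + 1, 1, 0]
  (bin_offsets.foldl
    (fun (st : Int × Int × List (Int × Int)) bin_offset =>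
      let (sb, eb, acc) := st
      (sb >>> (3 : Nat), eb >>> (3 : Nat), acc ++ [(bin_offset + sb, bin_offset + eb)]))
    (start_bin, end_bin, [])).2.2

-- ===== PORT B =====
-- recursive helper 'go' of Source B: recursion on the shift, offset derived via >>> 3
def binsGo (start : Int) (end_ : Int) (shift : Nat) (offset : Int) : List (Int × Int) :=
  if shift ≤ 29 then
    (offset + (start >>> shift), offset + ((end_ - 1) >>> shift)) ::
      binsGo start end_ (shift + 3) (offset >>> (3 : Nat))
  else []
termination_by 30 - shift

def bins_for_range_alt (start : Int) (end_ : Int) : List (Int × Int) :=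
  binsGo start end_ 17 585

-- ===== PRECONDITION & SPEC =====
def Spec_bins_for_range (start : Int) (end_ : Int) (out : List (Int × Int)) : Prop := out = bins_for_range_alt start end_
instance (start : Int) (end_ : Int) (out : List (Int × Int)) : Decidable (Spec_bins_for_range start end_ out) := by unfold Spec_bins_for_range; infer_instance

-- ===== CLAIM (what is proved, stated in full; the proofs are below) =====
def Claim_equal_bins_for_range : Prop := ∀ (start : Int) (end_ : Int), Dom_bins_for_range start end_ → Spec_bins_for_range start end_ (bins_for_range start end_)

-- ===== LEMMAS AND PROOFS =====
theorem shift_shift (n : Int) (a b : Nat) : (n >>> a) >>> b = n >>> (a + b) :=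
  (Int.shiftRight_add n a b).symm

-- ===== VERDICT (by name: the statement is the Claim_ definition above) =====
theorem bins_for_range_spec : Claim_equal_bins_for_range := by
  intro start end_ _
  unfold Spec_bins_for_range bins_for_range bins_for_range_alt
  rw [binsGo, binsGo, binsGo, binsGo, binsGo, binsGo]
  simp [List.foldl, shift_shift]
  refine ⟨by decide, by decide, by decide, by decide⟩
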